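-- pv_equiv track=rewrite | github.com/Aycon3296/TotoForest | intervals.py | min_values
-- ===== SOURCE A (Python) =====
-- import heapq
--
-- def min_values(intervals):
--     # event queue
--     events = [] # (x, is_end, index, value, label)
--     for index, (start, stop, value, label) in enumerate(intervals):
--         events.append((start, False, index, value, label))
--         events.append((stop , True , index, value, label))
--     events.sort()
--
--     # status
--     deleted = [False] * (len(events) // 2)
--     heap = []
--
--     # print
--     last_start = None
--     last_value = None
--     last_label = None
--
--     for x, is_end, index, value, label in events:
--         # update status
--         if is_end:
--             deleted[index] = True
--         else:
--             heapq.heappush(heap, (value, index, label))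
--
--         # remove deleted items from heap top
--         while heap and deleted[heap[0][1]]:
--             heapq.heappop(heap)
--
--         # print
--         value = heap[0][0] if heap else None
--         label = heap[0][2] if heap else None
--         if value != last_value:
--             if last_value is not None and last_start < x:
--                 yield last_label, last_start, x
--             last_start = x
--             last_value = value
--             last_label = label
-- ===== SOURCE B (Python) =====
-- def min_values(intervals):
--     # Same event list and sort as the sweep requires; the lazy-deletion heap is
--     # replaced by a dict of active intervals (index -> (value, label)) plus the
--     # set of already-ended indices; the current minimum is found by scanning the
--     # dict with key (value, index), which reproduces the heap's tie-breaking.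
--     events = sorted(e
--                     for index, (start, stop, value, label) in enumerate(intervals)
--                     for e in ((start, False, index, value, label),
--                               (stop, True, index, value, label)))
--     active = {}
--     ended = set()
--     last_start = None
--     last_value = None
--     last_label = None
--     for x, is_end, index, value, label in events:
--         if is_end:
--             ended.add(index)
--             active.pop(index, None)
--         elif index not in ended:
--             active[index] = (value, label)
--         if active:
--             index, (value, label) = min(active.items(), key=lambda kv: (kv[1][0], kv[0]))
--         else:
--             value = None
--             label = None
--         if value != last_value:
--             if last_value is not None and last_start < x:
--                 yield last_label, last_start, x
--             last_start = x
--             last_value = value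
--             last_label = label
-- ===== Notes on version B (the rewrite author's own statement) =====
-- stated objective: alternative
-- what changed: The lazy-deletion min-heap with a deleted[] array is replaced by a dict of currently active intervals (index -> (value, label)) plus a set of ended indices; the current minimum is recomputed per event by scanning the dict with key (value, index), which reproduces the heap's tie-break since indices are unique.
import Mathlib
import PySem

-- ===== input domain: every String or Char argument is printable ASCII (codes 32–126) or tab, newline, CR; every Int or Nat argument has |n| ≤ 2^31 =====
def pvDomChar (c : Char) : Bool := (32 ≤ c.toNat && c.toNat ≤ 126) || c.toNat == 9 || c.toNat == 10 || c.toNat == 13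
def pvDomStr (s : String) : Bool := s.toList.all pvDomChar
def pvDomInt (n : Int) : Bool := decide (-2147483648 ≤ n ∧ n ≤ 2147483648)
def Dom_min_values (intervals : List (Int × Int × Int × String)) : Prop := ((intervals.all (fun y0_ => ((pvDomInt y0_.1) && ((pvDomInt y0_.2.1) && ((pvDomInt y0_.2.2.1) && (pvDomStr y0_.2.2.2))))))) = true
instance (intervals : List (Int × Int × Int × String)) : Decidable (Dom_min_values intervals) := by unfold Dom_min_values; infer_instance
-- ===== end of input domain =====

-- B replaces A's lazy-deletion min-heap + deleted[] array by a dict of active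
-- intervals plus a set of ended indices, recomputing the minimum by a scan;
-- objective: alternative (structurally different, not faster).

-- ===== PORT A =====

-- Python's `<` on strings: lexicographic on code points (exact for all strings).
def chLt : List Char → List Char → Bool
  | [], [] => false
  | [], _ :: _ => true
  | _ :: _, [] => false
  | a :: as, b :: bs =>
    if a.toNat < b.toNat then true
    else if b.toNat < a.toNat then false
    else chLt as bs

def pyStrLt (a b : String) : Bool := chLt a.toList b.toList

-- event tuple (x, is_end, index, value, label); Python tuple `<` (False < True on bools)
abbrev Ev : Type := Int × Bool × Int × Int × String

def evLt (a b : Ev) : Bool :=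
  a.1 < b.1 || (a.1 == b.1 && (
    (!a.2.1 && b.2.1) || (a.2.1 == b.2.1 && (
      a.2.2.1 < b.2.2.1 || (a.2.2.1 == b.2.2.1 && (
        a.2.2.2.1 < b.2.2.2.1 || (a.2.2.2.1 == b.2.2.2.1 && pyStrLt a.2.2.2.2 b.2.2.2.2)))))))

-- Python list.sort()/sorted() on tuples: stable insertion sort with tuple `<`
-- (same shape as PySem.List.sorted_eq_foldl_insertBy; shared by both ports,
-- both Pythons sort the same tuples with the same built-in).
def sortEvents (evs : List Ev) : List Ev :=
  evs.foldl (fun acc e => PySem.List.insertBy evLt e acc) []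

-- heap entry (value, index, label)
abbrev HeapE : Type := Int × Int × String

def heapLt (a b : HeapE) : Bool :=
  a.1 < b.1 || (a.1 == b.1 && (a.2.1 < b.2.1 || (a.2.1 == b.2.1 && pyStrLt a.2.2 b.2.2)))

-- heapq min-heap modeled as a list kept sorted by Python's tuple `<`: heappush
-- inserts in order (after equal entries), heappop removes the head, heap[0] is
-- the head — the same heap[0]/heappop/truthiness observations heapq gives for
-- the totally ordered distinct tuples this program stores.
def heappush (h : List HeapE) (e : HeapE) : List HeapE := PySem.List.insertBy heapLt e h

-- `while heap and deleted[heap[0][1]]: heapq.heappop(heap)`; the index read from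
-- the heap is always a valid index into `deleted` (0 ≤ index < len(intervals)),
-- so the getD default is never what decides a reachable test.
def purge (dl : List Bool) : List HeapE → List HeapE
  | [] => []
  | e :: t => if dl.getD e.2.1.toNat false then purge dl t else e :: t

structure StA where
  deleted : List Bool
  heap : List HeapE
  lastStart : Option Int
  lastValue : Option Int
  lastLabel : Option String
  out : List (String × Int × Int)

def stepA (st : StA) (e : Ev) : StA :=
  let x := e.1; let isEnd := e.2.1; let index := e.2.2.1
  let value := e.2.2.2.1; let label := e.2.2.2.2
  -- update status (`deleted[index] = True`: index is always in range, see above)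
  let dl := if isEnd then st.deleted.set index.toNat true else st.deleted
  let h0 := if isEnd then st.heap else heappush st.heap (value, index, label)
  -- remove deleted items from heap top
  let h := purge dl h0
  -- print
  let v : Option Int := h.head?.map (fun e => e.1)
  let l : Option String := h.head?.map (fun e => e.2.2)
  if v ≠ st.lastValue then
    -- `last_start < x` is only reached with last_value ≠ None, where last_start
    -- and last_label are also ≠ None; the catch-all branch is unreachable.
    let out' :=
      match st.lastValue, st.lastStart, st.lastLabel with
      | some _, some ls, ll => if ls < x then st.out ++ [(ll.getD "", ls, x)] else st.out
      | _, _, _ => st.out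
    ⟨dl, h, some x, v, l, out'⟩
  else
    ⟨dl, h, st.lastStart, st.lastValue, st.lastLabel, st.out⟩

def min_values (intervals : List (Int × Int × Int × String)) : List (String × Int × Int) :=
  let events := sortEvents
    ((PySem.List.enumerate intervals).foldl
      (fun acc p =>
        (acc ++ [(p.2.1, false, p.1, p.2.2.2.1, p.2.2.2.2)]) ++ [(p.2.2.1, true, p.1, p.2.2.2.1, p.2.2.2.2)])
      [])
  (events.foldl stepA ⟨List.replicate (events.length / 2) false, [], none, none, none, []⟩).out

-- ===== PORT B =====

structure StB where
  active : PySem.Dict Int (Int × String)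
  ended : PySem.Set Int
  lastStart : Option Int
  lastValue : Option Int
  lastLabel : Option String
  out : List (String × Int × Int)

def stepB (st : StB) (e : Ev) : StB :=
  let x := e.1; let isEnd := e.2.1; let index := e.2.2.1
  let value := e.2.2.2.1; let label := e.2.2.2.2
  let ac :=
    if isEnd then st.active.erase index            -- active.pop(index, None)
    else if PySem.Set.contains st.ended index then st.active
    else st.active.insert index (value, label)
  let en := if isEnd then PySem.Set.add st.ended index else st.ended
  -- `min(active.items(), key=lambda kv: (kv[1][0], kv[0]))` if active else None
  let m := PySem.List.min2? ac.items (fun kv => kv.2.1) (fun kv => kv.1)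
  let v : Option Int := m.map (fun kv => kv.2.1)
  let l : Option String := m.map (fun kv => kv.2.2)
  if v ≠ st.lastValue then
    let out' :=
      match st.lastValue, st.lastStart, st.lastLabel with
      | some _, some ls, ll => if ls < x then st.out ++ [(ll.getD "", ls, x)] else st.out
      | _, _, _ => st.out
    ⟨ac, en, some x, v, l, out'⟩
  else
    ⟨ac, en, st.lastStart, st.lastValue, st.lastLabel, st.out⟩

def min_values_alt (intervals : List (Int × Int × Int × String)) : List (String × Int × Int) :=
  let events := sortEvents
    ((PySem.List.enumerate intervals).flatMap
      (fun p => [(p.2.1, false, p.1, p.2.2.2.1, p.2.2.2.2), (p.2.2.1, true, p.1, p.2.2.2.1, p.2.2.2.2)]))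
  (events.foldl stepB ⟨PySem.Dict.empty, PySem.Set.empty, none, none, none, []⟩).out

-- ===== PRECONDITION & SPEC =====
def Spec_min_values (intervals : List (Int × Int × Int × String)) (out : List (String × Int × Int)) : Prop := out = min_values_alt intervals
instance (intervals : List (Int × Int × Int × String)) (out : List (String × Int × Int)) : Decidable (Spec_min_values intervals out) := by unfold Spec_min_values; infer_instance

-- ===== CLAIM (what is proved, stated in full; the proofs are below) =====
def Claim_equal_min_values : Prop := ∀ (intervals : List (Int × Int × Int × String)), Dom_min_values intervals → Spec_min_values intervals (min_values intervals)

-- ===== LEMMAS AND PROOFS =====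

-- proof-side helper definitions
def hIdx (h : List HeapE) : List Int := h.map (fun e => e.2.1)
def del (dl : List Bool) (i : Int) : Bool := dl.getD i.toNat false
def ltVI (a b : HeapE) : Prop := a.1 < b.1 ∨ (a.1 = b.1 ∧ a.2.1 < b.2.1)

theorem ltVI_trans {a b c : HeapE} (h1 : ltVI a b) (h2 : ltVI b c) : ltVI a c := by
  unfold ltVI at *; omega

theorem heapLt_eq_true_iff {a b : HeapE} (hne : a.2.1 ≠ b.2.1) : heapLt a b = true ↔ ltVI a b := by
  unfold heapLt ltVI
  simp only [Bool.or_eq_true, Bool.and_eq_true, decide_eq_true_eq, beq_iff_eq]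
  constructor
  · rintro (h | ⟨h1, (h2 | ⟨h3, _⟩)⟩) <;> omega
  · rintro (h | ⟨h1, h2⟩)
    · exact Or.inl h
    · exact Or.inr ⟨h1, Or.inl h2⟩

theorem ltVI_of_not_heapLt {a b : HeapE} (hne : a.2.1 ≠ b.2.1) (h : ¬ heapLt a b = true) : ltVI b a := by
  have h' : ¬ ltVI a b := fun hl => h ((heapLt_eq_true_iff hne).2 hl)
  unfold ltVI at *; omega

theorem insertBy_pairwise_ltVI (x : HeapE) (h : List HeapE)
    (hp : h.Pairwise ltVI) (hfresh : ∀ y ∈ h, y.2.1 ≠ x.2.1) :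
    (PySem.List.insertBy heapLt x h).Pairwise ltVI := by
  induction h with
  | nil => simp [PySem.List.insertBy]
  | cons y ys ih =>
    rw [PySem.List.insertBy]
    have hyx : y.2.1 ≠ x.2.1 := hfresh y (by simp)
    rcases List.pairwise_cons.1 hp with ⟨hyall, hpys⟩
    by_cases hb : heapLt x y = true
    · simp only [hb, if_true]
      have hxy : ltVI x y := (heapLt_eq_true_iff (Ne.symm hyx)).1 hb
      refine List.pairwise_cons.2 ⟨?_, hp⟩
      intro z hz
      rcases List.mem_cons.1 hz with hz | hz
      · exact hz ▸ hxy
      · exact ltVI_trans hxy (hyall z hz)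
    · simp only [hb]
      have hyx' : ltVI y x := ltVI_of_not_heapLt (Ne.symm hyx) hb
      refine List.pairwise_cons.2 ⟨?_, ih hpys (fun z hz => hfresh z (by simp [hz]))⟩
      intro z hz
      rcases (PySem.List.mem_insertBy heapLt x z ys).1 hz with hz | hz
      · exact hz ▸ hyx'
      · exact hyall z hz

theorem hIdx_insertBy_perm (x : HeapE) (h : List HeapE) :
    (hIdx (PySem.List.insertBy heapLt x h)).Perm (x.2.1 :: hIdx h) := by
  simpa [hIdx] using (PySem.List.insertBy_perm heapLt x h).map (fun e : HeapE => e.2.1)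

-- purge facts
theorem purge_suffix (dl : List Bool) (h : List HeapE) : (purge dl h).IsSuffix h := by
  induction h with
  | nil => simp [purge]
  | cons e t ih =>
    rw [purge]
    by_cases hd : dl.getD e.2.1.toNat false = true
    · rw [if_pos hd]; exact ih.trans (List.suffix_cons e t)
    · rw [if_neg hd]

theorem purge_subset {dl : List Bool} {h : List HeapE} : ∀ x ∈ purge dl h, x ∈ h :=
  fun _ hx => (purge_suffix dl h).sublist.subset hx

theorem pairwise_purge {dl : List Bool} {h : List HeapE} (hp : h.Pairwise ltVI) :
    (purge dl h).Pairwise ltVI := hp.sublist (purge_suffix dl h).sublist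

theorem mem_purge {dl : List Bool} {h : List HeapE} {x : HeapE}
    (hx : x ∈ h) (hnd : del dl x.2.1 = false) : x ∈ purge dl h := by
  induction h with
  | nil => simp at hx
  | cons e t ih =>
    rw [purge]
    by_cases hd : dl.getD e.2.1.toNat false = true
    · rcases List.mem_cons.1 hx with hx | hx
      · subst hx
        rw [del] at hnd
        rw [hnd] at hd
        exact absurd hd (by simp)
      · rw [if_pos hd]; exact ih hx
    · rw [if_neg hd]; exact hx

theorem purge_head_not_del {dl : List Bool} {h : List HeapE} {m : HeapE} {rest : List HeapE}
    (hp : purge dl h = m :: rest) : del dl m.2.1 = false := by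
  induction h with
  | nil => simp [purge] at hp
  | cons e t ih =>
    rw [purge] at hp
    by_cases hd : dl.getD e.2.1.toNat false = true
    · rw [if_pos hd] at hp; exact ih hp
    · rw [if_neg hd] at hp
      cases hp
      rw [del]
      simpa using hd

def ltp {α : Type} (k1 k2 : α → Int) (a b : α) : Prop :=
  k1 a < k1 b ∨ (k1 a = k1 b ∧ k2 a < k2 b)

def minStep {α : Type} (k1 k2 : α → Int) (acc : Option α) (x : α) : Option α :=
  match acc with
  | none => some x
  | some mm =>
    if (decide (k1 x < k1 mm) || !decide (k1 mm < k1 x) && decide (k2 x < k2 mm)) = true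
    then some x else some mm

theorem minStep_keep {α : Type} (k1 k2 : α → Int) {m y : α} (h : ltp k1 k2 m y) :
    minStep k1 k2 (some m) y = some m := by
  rw [minStep]
  rw [if_neg]
  rcases h with h | ⟨h1, h2⟩ <;> simp <;> omega

theorem minStep_win {α : Type} (k1 k2 : α → Int) {m z : α} (h : ltp k1 k2 m z) :
    minStep k1 k2 (some z) m = some m := by
  rw [minStep]
  rw [if_pos]
  rcases h with h | ⟨h1, h2⟩ <;> simp <;> omega

theorem minStep_self {α : Type} (k1 k2 : α → Int) (m : α) :
    minStep k1 k2 (some m) m = some m := by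
  rw [minStep]; split <;> rfl

theorem min2?_foldl_aux {α : Type} (k1 k2 : α → Int) (m : α) :
    ∀ (xs : List α) (acc : Option α),
    (∀ y ∈ xs, y = m ∨ ltp k1 k2 m y) →
    (acc = some m ∨ (m ∈ xs ∧ (acc = none ∨ ∃ z, acc = some z ∧ ltp k1 k2 m z))) →
    xs.foldl (minStep k1 k2) acc = some m := by
  intro xs
  induction xs with
  | nil =>
    intro acc _ hacc
    rcases hacc with h | ⟨hm, _⟩
    · simpa using h
    · simp at hm
  | cons y t ih =>
    intro acc hall hacc
    simp only [List.foldl_cons]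
    have hallt : ∀ w ∈ t, w = m ∨ ltp k1 k2 m w := fun w hw => hall w (by simp [hw])
    rcases hacc with rfl | ⟨hm, hrest⟩
    · rcases hall y (by simp) with rfl | hlt
      · rw [minStep_self]; exact ih _ hallt (Or.inl rfl)
      · rw [minStep_keep k1 k2 hlt]; exact ih _ hallt (Or.inl rfl)
    · rcases hrest with rfl | ⟨z, rfl, hz⟩
      · rcases List.mem_cons.1 hm with rfl | hm'
        · exact ih _ hallt (Or.inl (by rw [minStep]))
        · rcases hall y (by simp) with rfl | hlt
          · exact ih _ hallt (Or.inl (by rw [minStep]))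
          · exact ih _ hallt (Or.inr ⟨hm', Or.inr ⟨y, by rw [minStep], hlt⟩⟩)
      · rcases List.mem_cons.1 hm with rfl | hm'
        · rw [minStep_win k1 k2 hz]; exact ih _ hallt (Or.inl rfl)
        · rcases hall y (by simp) with rfl | hlt
          · rw [minStep_win k1 k2 hz]; exact ih _ hallt (Or.inl rfl)
          · rw [minStep]
            split
            · exact ih _ hallt (Or.inr ⟨hm', Or.inr ⟨y, rfl, hlt⟩⟩)
            · exact ih _ hallt (Or.inr ⟨hm', Or.inr ⟨z, rfl, hz⟩⟩)

theorem min2?_eq_of_unique {α : Type} (k1 k2 : α → Int) (xs : List α) (m : α)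
    (hm : m ∈ xs) (hlt : ∀ y ∈ xs, y ≠ m → ltp k1 k2 m y) :
    PySem.List.min2? xs k1 k2 = some m := by
  have : PySem.List.min2? xs k1 k2 = xs.foldl (minStep k1 k2) none := rfl
  rw [this]
  exact min2?_foldl_aux k1 k2 m xs none
    (fun y hy => by
      by_cases hy' : y = m
      · exact Or.inl hy'
      · exact Or.inr (hlt y hy hy'))
    (Or.inr ⟨hm, Or.inl rfl⟩)

theorem del_set_self {dl : List Bool} {i : Int} (hlen : i.toNat < dl.length) :
    del (dl.set i.toNat true) i = true := by
  simp [del, List.getD_eq_getElem?_getD, hlen]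

theorem del_set_ne {dl : List Bool} {i j : Int} (hij : i.toNat ≠ j.toNat) :
    del (dl.set i.toNat true) j = del dl j := by
  simp [del, List.getD_eq_getElem?_getD, hij]

def SInv (dl : List Bool) (h : List HeapE) (ac : PySem.Dict Int (Int × String))
    (en : PySem.Set Int) : Prop :=
  h.Pairwise ltVI ∧
  (∀ e ∈ h, 0 ≤ e.2.1 ∧ e.2.1.toNat < dl.length) ∧
  (hIdx h).Nodup ∧
  (∀ v i l, ((v, i, l) ∈ h ∧ del dl i = false ∧ 0 ≤ i) ↔ (i, (v, l)) ∈ ac.items) ∧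
  ac.keys.Nodup ∧
  (∀ i : Int, 0 ≤ i → ((i ∈ (en : List Int)) ↔ del dl i = true))

theorem inv_purge {dl : List Bool} {h : List HeapE} {ac : PySem.Dict Int (Int × String)}
    {en : PySem.Set Int} (hinv : SInv dl h ac en) : SInv dl (purge dl h) ac en := by
  obtain ⟨h1, h2, h3, h4, h5, h6⟩ := hinv
  refine ⟨pairwise_purge h1, fun e he => h2 e (purge_subset e he), ?_, ?_, h5, h6⟩
  · exact h3.sublist ((purge_suffix dl h).sublist.map _)
  · intro v i l
    constructor
    · rintro ⟨hm, hd, hi⟩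
      exact (h4 v i l).1 ⟨purge_subset _ hm, hd, hi⟩
    · intro hm
      obtain ⟨hm', hd, hi⟩ := (h4 v i l).2 hm
      exact ⟨mem_purge hm' hd, hd, hi⟩

theorem inv_end {dl : List Bool} {h : List HeapE} {ac : PySem.Dict Int (Int × String)}
    {en : PySem.Set Int} {i : Int} (hi0 : 0 ≤ i) (hilen : i.toNat < dl.length)
    (hinv : SInv dl h ac en) :
    SInv (dl.set i.toNat true) h (ac.erase i) (PySem.Set.add en i) := by
  obtain ⟨h1, h2, h3, h4, h5, h6⟩ := hinv
  have hitems : (ac.erase i).items = ac.items.filter (fun p => !(p.1 == i)) := rfl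
  refine ⟨h1, ?_, h3, ?_, ?_, ?_⟩
  · intro e he; have := h2 e he; simpa [List.length_set] using this
  · intro v j l
    rw [hitems]
    constructor
    · rintro ⟨hm, hd, hj⟩
      by_cases hji : j = i
      · subst hji; rw [del_set_self hilen] at hd; cases hd
      · have hne : i.toNat ≠ j.toNat := by omega
        rw [del_set_ne hne] at hd
        refine List.mem_filter.2 ⟨(h4 v j l).1 ⟨hm, hd, hj⟩, by simpa using hji⟩
    · intro hm
      have hm' := List.mem_filter.1 hm
      have hji : j ≠ i := by simpa using hm'.2
      obtain ⟨hmh, hd, hj⟩ := (h4 v j l).2 hm'.1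
      have hne : i.toNat ≠ j.toNat := by omega
      exact ⟨hmh, by rw [del_set_ne hne]; exact hd, hj⟩
  · simp only [PySem.Dict.keys] at h5 ⊢
    rw [hitems]
    exact h5.sublist (List.Sublist.map _ List.filter_sublist)
  · intro j hj
    rw [PySem.Set.mem_add]
    by_cases hji : j = i
    · subst hji; simp [del_set_self hilen]
    · have hne : i.toNat ≠ j.toNat := by omega
      rw [del_set_ne hne]
      constructor
      · rintro (hm | rfl)
        · exact (h6 j hj).1 hm
        · exact absurd rfl hji
      · intro hd; exact Or.inl ((h6 j hj).2 hd)

theorem mem_hIdx {h : List HeapE} {j : Int} : j ∈ hIdx h ↔ ∃ e ∈ h, e.2.1 = j := by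
  simp [hIdx]

theorem inv_start {dl : List Bool} {h : List HeapE} {ac : PySem.Dict Int (Int × String)}
    {en : PySem.Set Int} {v i : Int} {l : String}
    (hi0 : 0 ≤ i) (hilen : i.toNat < dl.length) (hfresh : i ∉ hIdx h)
    (hinv : SInv dl h ac en) :
    SInv dl (heappush h (v, i, l))
      (if PySem.Set.contains en i then ac else ac.insert i (v, l)) en := by
  obtain ⟨h1, h2, h3, h4, h5, h6⟩ := hinv
  have hfr : ∀ y ∈ h, y.2.1 ≠ i := by
    intro y hy hcon
    exact hfresh (mem_hIdx.2 ⟨y, hy, hcon⟩)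
  have hmemP : ∀ z, z ∈ heappush h (v, i, l) ↔ z = (v, i, l) ∨ z ∈ h :=
    fun z => PySem.List.mem_insertBy heapLt (v, i, l) z h
  have hpair : (heappush h (v, i, l)).Pairwise ltVI :=
    insertBy_pairwise_ltVI (v, i, l) h h1 hfr
  have hrange : ∀ e ∈ heappush h (v, i, l), 0 ≤ e.2.1 ∧ e.2.1.toNat < dl.length := by
    intro e he
    rcases (hmemP e).1 he with rfl | he'
    · exact ⟨hi0, hilen⟩
    · exact h2 e he'
  have hnodup : (hIdx (heappush h (v, i, l))).Nodup := by
    refine ((hIdx_insertBy_perm (v, i, l) h).nodup_iff).2 ?_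
    exact List.nodup_cons.2 ⟨hfresh, h3⟩
  by_cases hc : PySem.Set.contains en i = true
  · rw [if_pos hc]
    have hdel : del dl i = true := (h6 i hi0).1 ((PySem.Set.contains_iff en i).1 hc)
    refine ⟨hpair, hrange, hnodup, ?_, h5, h6⟩
    intro v' j l'
    constructor
    · rintro ⟨hm, hd, hj⟩
      rcases (hmemP _).1 hm with heq | hm'
      · injection heq with e1 e2
        injection e2 with e3 e4
        subst e1; subst e3; subst e4
        rw [hdel] at hd; cases hd
      · exact (h4 v' j l').1 ⟨hm', hd, hj⟩
    · intro hm
      obtain ⟨hmh, hd, hj⟩ := (h4 v' j l').2 hm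
      exact ⟨(hmemP _).2 (Or.inr hmh), hd, hj⟩
  · rw [if_neg hc]
    have hnin : ¬ i ∈ (en : List Int) := fun hm => hc ((PySem.Set.contains_iff en i).2 hm)
    have hdel : del dl i = false := by
      rcases hdel' : del dl i with _ | _
      · rfl
      · exact absurd ((h6 i hi0).2 hdel') hnin
    have hnc : ac.contains i = false := by
      rcases hcc : ac.contains i with _ | _
      · rfl
      · exfalso
        have hk := (PySem.Dict.contains_iff_mem_keys ac i).1 hcc
        simp only [PySem.Dict.keys, List.mem_map] at hk
        obtain ⟨⟨j, w⟩, hw, hj⟩ := hk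
        obtain ⟨hmh, _, _⟩ := (h4 w.1 j w.2).2 (by simpa using hw)
        exact hfresh (mem_hIdx.2 ⟨(w.1, j, w.2), hmh, by simpa using hj⟩)
    have hitems : (ac.insert i (v, l)).items = ac.items ++ [(i, (v, l))] :=
      PySem.Dict.items_insert_of_not_contains ac (v, l) hnc
    refine ⟨hpair, hrange, hnodup, ?_, ?_, h6⟩
    · intro v' j l'
      rw [hitems, List.mem_append]
      constructor
      · rintro ⟨hm, hd, hj⟩
        rcases (hmemP _).1 hm with heq | hm'
        · injection heq with e1 e2
          injection e2 with e3 e4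
          subst e1; subst e3; subst e4
          exact Or.inr (by simp)
        · exact Or.inl ((h4 v' j l').1 ⟨hm', hd, hj⟩)
      · rintro (hm | hm)
        · obtain ⟨hmh, hd, hj⟩ := (h4 v' j l').2 hm
          exact ⟨(hmemP _).2 (Or.inr hmh), hd, hj⟩
        · simp only [List.mem_singleton, Prod.mk.injEq] at hm
          obtain ⟨rfl, rfl, rfl⟩ := hm
          exact ⟨(hmemP _).2 (Or.inl rfl), hdel, hi0⟩
    · simp only [PySem.Dict.keys, hitems, List.map_append]
      have hknin : i ∉ ac.items.map (fun p => p.1) := by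
        intro hk
        have := (PySem.Dict.contains_iff_mem_keys ac i).2 (by simpa [PySem.Dict.keys] using hk)
        rw [hnc] at this; cases this
      simp only [PySem.Dict.keys] at h5
      refine List.nodup_append.2 ⟨h5, List.nodup_singleton _, ?_⟩
      intro a ha b hb
      simp only [List.map_cons, List.map_nil, List.mem_singleton] at hb
      subst hb
      exact fun hcon => hknin (hcon ▸ ha)

theorem purge_nil_items {dl : List Bool} {h : List HeapE} {ac : PySem.Dict Int (Int × String)}
    {en : PySem.Set Int} (hinv : SInv dl h ac en) (hp : purge dl h = []) :
    ac.items = [] := by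
  obtain ⟨_, _, _, h4, _, _⟩ := hinv
  refine List.eq_nil_iff_forall_not_mem.2 ?_
  rintro ⟨j, v, l⟩ hm
  obtain ⟨hmh, hd, _⟩ := (h4 v j l).2 hm
  have := mem_purge hmh hd
  rw [hp] at this
  cases this

theorem purge_cons_min2 {dl : List Bool} {h : List HeapE} {ac : PySem.Dict Int (Int × String)}
    {en : PySem.Set Int} {m : HeapE} {rest : List HeapE}
    (hinv : SInv dl h ac en) (hp : purge dl h = m :: rest) :
    PySem.List.min2? ac.items (fun kv => kv.2.1) (fun kv => kv.1)
      = some (m.2.1, (m.1, m.2.2)) := by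
  obtain ⟨h1, h2, h3, h4, h5, h6⟩ := hinv
  have hmh : m ∈ h := purge_subset m (hp ▸ List.mem_cons_self)
  have hmd : del dl m.2.1 = false := purge_head_not_del hp
  have hm0 : 0 ≤ m.2.1 := (h2 m hmh).1
  have hmem : (m.2.1, (m.1, m.2.2)) ∈ ac.items := by
    refine (h4 m.1 m.2.1 m.2.2).1 ⟨?_, hmd, hm0⟩
    simpa using hmh
  refine min2?_eq_of_unique _ _ _ _ hmem ?_
  rintro ⟨j, v, l⟩ hy hne
  obtain ⟨hyh, hyd, _⟩ := (h4 v j l).2 hy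
  have hyp : (v, j, l) ∈ purge dl h := mem_purge hyh hyd
  rw [hp] at hyp
  rcases List.mem_cons.1 hyp with heq | hyrest
  · exfalso
    apply hne
    rw [← heq]
  · have hlt : ltVI m (v, j, l) := by
      have hpw := pairwise_purge (dl := dl) h1
      rw [hp] at hpw
      exact (List.pairwise_cons.1 hpw).1 _ hyrest
    rcases hlt with hlt | ⟨he, hlt⟩
    · exact Or.inl hlt
    · exact Or.inr ⟨he.symm ▸ rfl, hlt⟩

theorem step_eq (sa : StA) (sb : StB) (e : Ev)
    (hr0 : 0 ≤ e.2.2.1) (hrlen : e.2.2.1.toNat < sa.deleted.length)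
    (hfresh : e.2.1 = false → e.2.2.1 ∉ hIdx sa.heap)
    (hinv : SInv sa.deleted sa.heap sb.active sb.ended)
    (h1 : sa.lastStart = sb.lastStart) (h2 : sa.lastValue = sb.lastValue)
    (h3 : sa.lastLabel = sb.lastLabel) (h4 : sa.out = sb.out) :
    SInv (stepA sa e).deleted (stepA sa e).heap (stepB sb e).active (stepB sb e).ended
    ∧ (stepA sa e).lastStart = (stepB sb e).lastStart
    ∧ (stepA sa e).lastValue = (stepB sb e).lastValue
    ∧ (stepA sa e).lastLabel = (stepB sb e).lastLabel
    ∧ (stepA sa e).out = (stepB sb e).out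
    ∧ (stepA sa e).deleted.length = sa.deleted.length
    ∧ (∀ j ∈ hIdx (stepA sa e).heap, (e.2.1 = false ∧ j = e.2.2.1) ∨ j ∈ hIdx sa.heap) := by
  obtain ⟨x, isEnd, i, v, l⟩ := e
  simp only at hr0 hrlen hfresh
  cases isEnd
  case false =>
    -- start event: A pushes, B inserts unless the interval already ended
    have hinv1 : SInv sa.deleted (heappush sa.heap (v, i, l))
        (if PySem.Set.contains sb.ended i then sb.active else sb.active.insert i (v, l))
        sb.ended := inv_start hr0 hrlen (hfresh rfl) hinv
    obtain ⟨acq, hacq⟩ : ∃ acq, (if PySem.Set.contains sb.ended i = true then sb.active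
        else sb.active.insert i (v, l)) = acq := ⟨_, rfl⟩
    rw [hacq] at hinv1
    have hinv2 := inv_purge (en := sb.ended) hinv1
    have hsup : ∀ j ∈ hIdx (purge sa.deleted (heappush sa.heap (v, i, l))),
        j = i ∨ j ∈ hIdx sa.heap := by
      intro j hj
      obtain ⟨e', he', hej⟩ := mem_hIdx.1 hj
      rcases (PySem.List.mem_insertBy heapLt (v, i, l) e' sa.heap).1 (purge_subset e' he') with rfl | hm
      · exact Or.inl hej.symm
      · exact Or.inr (mem_hIdx.2 ⟨e', hm, hej⟩)
    rcases hcase : purge sa.deleted (heappush sa.heap (v, i, l)) with _ | ⟨m, rest⟩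
    · have hitems : acq.items = [] := purge_nil_items hinv1 hcase
      have hmin : PySem.List.min2? acq.items
          (fun kv => kv.2.1) (fun kv => kv.1) = none := by
        rw [hitems]; rfl
      rw [hcase] at hinv2 hsup
      refine ⟨?_, ?_, ?_, ?_, ?_, ?_, ?_⟩ <;>
        simp only [stepA, stepB, hacq, hcase, hmin, h1, h2, h3, h4, Bool.false_eq_true,
          eq_self_iff_true, true_and, if_false, if_true, List.head?_nil, Option.map_none]
      case _ => split_ifs with hcnd <;> exact hinv2
      case _ => split_ifs with hcnd <;> rfl
      case _ => split_ifs with hcnd <;> rfl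
      case _ => split_ifs with hcnd <;> rfl
      case _ => split_ifs with hcnd <;> rfl
      case _ => split_ifs with hcnd <;> rfl
      case _ =>
        split_ifs with hcnd <;>
          first
            | exact hsup
            | (refine fun j hj => ?_
               exact (hsup j (by simpa [hIdx] using hj)).imp (fun hji => by simp [hji]) id)
    · have hmin := purge_cons_min2 hinv1 hcase
      rw [hcase] at hinv2 hsup
      refine ⟨?_, ?_, ?_, ?_, ?_, ?_, ?_⟩ <;>
        simp only [stepA, stepB, hacq, hcase, hmin, h1, h2, h3, h4, Bool.false_eq_true,
          eq_self_iff_true, true_and, if_false, if_true, List.head?_cons, Option.map_some]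
      case _ => split_ifs with hcnd <;> exact hinv2
      case _ => split_ifs with hcnd <;> rfl
      case _ => split_ifs with hcnd <;> rfl
      case _ => split_ifs with hcnd <;> rfl
      case _ => split_ifs with hcnd <;> rfl
      case _ => split_ifs with hcnd <;> rfl
      case _ =>
        split_ifs with hcnd <;>
          first
            | exact hsup
            | (refine fun j hj => ?_
               exact (hsup j (by simpa [hIdx] using hj)).imp (fun hji => by simp [hji]) id)
  case true =>
    -- end event: A marks deleted, B removes from active and records ended
    have hinv1 : SInv (sa.deleted.set i.toNat true) sa.heap
        (sb.active.erase i) (PySem.Set.add sb.ended i) := inv_end hr0 hrlen hinv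
    have hinv2 := inv_purge (en := PySem.Set.add sb.ended i) hinv1
    have hsup : ∀ j ∈ hIdx (purge (sa.deleted.set i.toNat true) sa.heap),
        j ∈ hIdx sa.heap := by
      intro j hj
      obtain ⟨e', he', hej⟩ := mem_hIdx.1 hj
      exact mem_hIdx.2 ⟨e', purge_subset e' he', hej⟩
    rcases hcase : purge (sa.deleted.set i.toNat true) sa.heap with _ | ⟨m, rest⟩
    · have hitems : (sb.active.erase i).items = [] := purge_nil_items hinv1 hcase
      have hmin : PySem.List.min2? (sb.active.erase i).items
          (fun kv => kv.2.1) (fun kv => kv.1) = none := by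
        rw [hitems]; rfl
      rw [hcase] at hinv2 hsup
      refine ⟨?_, ?_, ?_, ?_, ?_, ?_, ?_⟩ <;>
        simp only [stepA, stepB, hcase, hmin, h1, h2, h3, h4, Bool.false_eq_true,
          eq_self_iff_true, true_and, if_false, if_true, List.head?_nil, Option.map_none]
      case _ => split_ifs with hcnd <;> exact hinv2
      case _ => split_ifs with hcnd <;> rfl
      case _ => split_ifs with hcnd <;> rfl
      case _ => split_ifs with hcnd <;> rfl
      case _ => split_ifs with hcnd <;> rfl
      case _ => split_ifs with hcnd <;> simp [List.length_set]
      case _ =>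
        split_ifs with hcnd <;>
          first
            | exact hsup
            | (refine fun j hj => ?_
               have hm := hsup j (by simpa [hIdx] using hj)
               first
                 | exact hm
                 | exact Or.inr hm)
    · have hmin := purge_cons_min2 hinv1 hcase
      rw [hcase] at hinv2 hsup
      refine ⟨?_, ?_, ?_, ?_, ?_, ?_, ?_⟩ <;>
        simp only [stepA, stepB, hcase, hmin, h1, h2, h3, h4, Bool.false_eq_true,
          eq_self_iff_true, true_and, if_false, if_true, List.head?_cons, Option.map_some]
      case _ => split_ifs with hcnd <;> exact hinv2
      case _ => split_ifs with hcnd <;> rfl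
      case _ => split_ifs with hcnd <;> rfl
      case _ => split_ifs with hcnd <;> rfl
      case _ => split_ifs with hcnd <;> rfl
      case _ => split_ifs with hcnd <;> simp [List.length_set]
      case _ =>
        split_ifs with hcnd <;>
          first
            | exact hsup
            | (refine fun j hj => ?_
               have hm := hsup j (by simpa [hIdx] using hj)
               first
                 | exact hm
                 | exact Or.inr hm)

def WfEv (evs : List Ev) (hx : List Int) (n : Nat) : Prop :=
  (∀ e ∈ evs, 0 ≤ e.2.2.1 ∧ e.2.2.1.toNat < n) ∧
  ((evs.filter (fun e => !e.2.1)).map (fun e => e.2.2.1)).Nodup ∧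
  (∀ e ∈ evs, e.2.1 = false → e.2.2.1 ∉ hx)

theorem run_eq : ∀ (evs : List Ev) (sa : StA) (sb : StB),
    WfEv evs (hIdx sa.heap) sa.deleted.length →
    SInv sa.deleted sa.heap sb.active sb.ended →
    sa.lastStart = sb.lastStart → sa.lastValue = sb.lastValue →
    sa.lastLabel = sb.lastLabel → sa.out = sb.out →
    (evs.foldl stepA sa).out = (evs.foldl stepB sb).out := by
  intro evs
  induction evs with
  | nil =>
    intro sa sb _ _ _ _ _ h4
    simpa using h4
  | cons e t ih =>
    intro sa sb hw hinv h1 h2 h3 h4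
    obtain ⟨hrange, hnd, hdisj⟩ := hw
    have hr := hrange e (by simp)
    obtain ⟨hstep_inv, s1, s2, s3, s4, hlen, hsub⟩ :=
      step_eq sa sb e hr.1 hr.2 (fun hf => hdisj e (by simp) hf) hinv h1 h2 h3 h4
    simp only [List.foldl_cons]
    refine ih (stepA sa e) (stepB sb e) ⟨?_, ?_, ?_⟩ hstep_inv s1 s2 s3 s4
    · intro f hf
      rw [hlen]
      exact hrange f (by simp [hf])
    · exact hnd.sublist (List.Sublist.map _ ((List.sublist_cons_self e t).filter _))
    · intro f hf hfstart hcon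
      rcases hsub _ hcon with ⟨hestart, hfeq⟩ | hmem
      · -- e is a start event with the same index as the later start event f
        have hfe : List.filter (fun x => !x.2.1) (e :: t)
            = e :: List.filter (fun x => !x.2.1) t := by
          rw [List.filter_cons]
          simp [hestart]
        rw [hfe] at hnd
        simp only [List.map_cons, List.nodup_cons] at hnd
        exact hnd.1 (hfeq ▸ List.mem_map_of_mem (List.mem_filter.2 ⟨hf, by simp [hfstart]⟩))
      · exact hdisj f (by simp [hf]) hfstart hmem

theorem eventsA_eq_flatMap (I : List (Int × Int × Int × String)) :
    (PySem.List.enumerate I).foldl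
      (fun acc p =>
        (acc ++ [(p.2.1, false, p.1, p.2.2.2.1, p.2.2.2.2)]) ++ [(p.2.2.1, true, p.1, p.2.2.2.1, p.2.2.2.2)])
      []
    = (PySem.List.enumerate I).flatMap
        (fun p => [(p.2.1, false, p.1, p.2.2.2.1, p.2.2.2.2), (p.2.2.1, true, p.1, p.2.2.2.1, p.2.2.2.2)]) := by
  have hb : (fun (acc : List Ev) (p : Int × (Int × Int × Int × String)) =>
        (acc ++ [(p.2.1, false, p.1, p.2.2.2.1, p.2.2.2.2)]) ++ [(p.2.2.1, true, p.1, p.2.2.2.1, p.2.2.2.2)])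
      = fun acc p => acc ++ [(p.2.1, false, p.1, p.2.2.2.1, p.2.2.2.2), (p.2.2.1, true, p.1, p.2.2.2.1, p.2.2.2.2)] := by
    funext acc p
    simp
  rw [hb, PySem.List.foldl_append_eq_flatMap]
  simp

theorem sortEvents_perm (evs : List Ev) : (sortEvents evs).Perm evs := by
  simpa [sortEvents] using PySem.List.foldl_insertBy_perm evLt evs []

theorem min_values_eq_alt (intervals : List (Int × Int × Int × String)) :
    min_values intervals = min_values_alt intervals := by
  rw [min_values, min_values_alt, eventsA_eq_flatMap]
  set E := (PySem.List.enumerate intervals).flatMap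
    (fun p => [(p.2.1, false, p.1, p.2.2.2.1, p.2.2.2.2), (p.2.2.1, true, p.1, p.2.2.2.1, p.2.2.2.2)]) with hE
  have hperm : (sortEvents E).Perm E := sortEvents_perm E
  have hmemE : ∀ e ∈ E, 0 ≤ e.2.2.1 ∧ e.2.2.1.toNat < intervals.length := by
    intro e he
    rw [hE] at he
    obtain ⟨p, hp, hpe⟩ := List.mem_flatMap.1 he
    obtain ⟨k, hk, rfl⟩ := (PySem.List.mem_enumerate_iff intervals 0 p).1 hp
    simp only [List.mem_cons, List.mem_singleton, List.not_mem_nil, or_false] at hpe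
    rcases hpe with rfl | rfl <;> simpa using hk
  have hlenE : (sortEvents E).length = 2 * intervals.length := by
    rw [hperm.length_eq, hE, List.length_flatMap]
    rw [show (List.map (fun p => ([(p.2.1, false, p.1, p.2.2.2.1, p.2.2.2.2),
          (p.2.2.1, true, p.1, p.2.2.2.1, p.2.2.2.2)] : List Ev).length) (PySem.List.enumerate intervals 0))
        = List.map (fun _ => 2) (PySem.List.enumerate intervals 0) from by simp]
    rw [List.map_const']
    simp [List.sum_replicate, PySem.List.length_enumerate, smul_eq_mul, Nat.mul_comm]
  have hstarts : (E.filter (fun e => !e.2.1)) =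
      (PySem.List.enumerate intervals).map (fun p => (p.2.1, false, p.1, p.2.2.2.1, p.2.2.2.2)) := by
    rw [hE]
    induction (PySem.List.enumerate intervals 0) with
    | nil => simp
    | cons p t ihp => simp [List.filter_append, ihp, List.filter_cons]
  have hndE : ((E.filter (fun e => !e.2.1)).map (fun e => e.2.2.1)).Nodup := by
    rw [hstarts, List.map_map]
    have : ((fun (e : Ev) => e.2.2.1) ∘ (fun p : Int × (Int × Int × Int × String) =>
        ((p.2.1, false, p.1, p.2.2.2.1, p.2.2.2.2) : Ev))) = fun p => p.1 := by
      funext p; rfl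
    rw [this]
    have hpw := PySem.List.pairwise_lt_enumerate intervals 0
    exact (List.Pairwise.map (S := fun a b : Int => a < b)
      (fun p : Int × (Int × Int × Int × String) => p.1) (fun _ _ h => h) hpw).imp
      (fun h => ne_of_lt h)
  have hwf : WfEv (sortEvents E) (hIdx ([] : List HeapE)) (2 * intervals.length / 2) := by
    refine ⟨?_, ?_, ?_⟩
    · intro e he
      have := hmemE e (hperm.mem_iff.1 he)
      omega
    · refine ((hperm.filter _).map _).nodup_iff.2 hndE
    · intro e _ _
      simp [hIdx]
  have hinv0 : SInv (List.replicate (2 * intervals.length / 2) false) [] PySem.Dict.empty PySem.Set.empty := by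
    refine ⟨List.Pairwise.nil, by simp, by simp [hIdx], ?_, by simp [PySem.Dict.keys, PySem.Dict.empty], ?_⟩
    · intro v i l
      constructor
      · rintro ⟨hm, _, _⟩; cases hm
      · intro hm; cases hm
    · intro i _
      constructor
      · intro hm; cases hm
      · intro hd
        rw [del, List.getD_eq_getElem?_getD] at hd
        rcases Nat.lt_or_ge i.toNat (2 * intervals.length / 2) with hlt | hge
        · rw [List.getElem?_replicate] at hd
          rw [if_pos hlt] at hd
          simp at hd
        · rw [List.getElem?_eq_none (by simpa using hge)] at hd
          simp at hd
  rw [hlenE]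
  exact run_eq (sortEvents E)
    ⟨List.replicate (2 * intervals.length / 2) false, [], none, none, none, []⟩
    ⟨PySem.Dict.empty, PySem.Set.empty, none, none, none, []⟩
    (by simpa using hwf) hinv0 rfl rfl rfl rfl

-- ===== VERDICT (by name: the statement is the Claim_ definition above) =====
theorem min_values_spec : Claim_equal_min_values := by
  intro intervals _
  unfold Spec_min_values
  exact min_values_eq_alt intervals
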